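-- pv_equiv track=rewrite | github.com/aksfsu/QMOHI_tool | Codebase/qmohi/src/input_parser/parse_input.py | divide_query_keywords
-- ===== SOURCE A (Python) =====
-- def divide_query_keywords(keyword_list):
-- 	num_of_words = 0
-- 	keyword_list_dict = {}
--
-- 	# Dividing keyword_list in sub-lists (in dictionary) such that sub-lists will contain keywords having word count <= 26
-- 	for my_keyword in keyword_list:
-- 		num_of_words += len(my_keyword.split())
-- 		num_index = (num_of_words // 26) + 1
-- 		keyword_list_dict.setdefault(num_index, []).append(my_keyword)
--
-- 	# Making list of dictionary values
-- 	list_query_keywords = list(keyword_list_dict.values())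
--
-- 	# Join keywords for the API query
-- 	query_keywords = []
-- 	for each_query in list_query_keywords:
-- 		each_query = '" | "'.join(each_query)
-- 		query_keywords.append('"{0}"'.format(each_query))
--
-- 	return num_of_words, query_keywords
-- ===== SOURCE B (Python) =====
-- def divide_query_keywords(keyword_list):
--     # Peel maximal index runs: an outer loop repeatedly extracts the longest block of
--     # remaining keywords that shares one 26-word window (an inner scan advancing j),
--     # then formats that block from a slice in one step; no dict is built.
--     total = 0
--     queries = []
--     n = len(keyword_list)
--     i = 0
--     while i < n:
--         total += len(keyword_list[i].split())
--         gidx = total // 26 + 1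
--         j = i + 1
--         while j < n:
--             t2 = total + len(keyword_list[j].split())
--             if t2 // 26 + 1 != gidx:
--                 break
--             total = t2
--             j += 1
--         queries.append('"{0}"'.format('" | "'.join(keyword_list[i:j])))
--         i = j
--     return total, queries
-- ===== Notes on version B (the rewrite author's own statement) =====
-- stated objective: alternative
-- what changed: Replaces the per-keyword setdefault-dict grouping plus a second formatting pass with a nested-loop run peeler: an outer loop extracts each maximal same-window block via an inner index scan and formats it directly from a list slice, so no dict and no intermediate list-of-groups is kept.
import Mathlib
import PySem

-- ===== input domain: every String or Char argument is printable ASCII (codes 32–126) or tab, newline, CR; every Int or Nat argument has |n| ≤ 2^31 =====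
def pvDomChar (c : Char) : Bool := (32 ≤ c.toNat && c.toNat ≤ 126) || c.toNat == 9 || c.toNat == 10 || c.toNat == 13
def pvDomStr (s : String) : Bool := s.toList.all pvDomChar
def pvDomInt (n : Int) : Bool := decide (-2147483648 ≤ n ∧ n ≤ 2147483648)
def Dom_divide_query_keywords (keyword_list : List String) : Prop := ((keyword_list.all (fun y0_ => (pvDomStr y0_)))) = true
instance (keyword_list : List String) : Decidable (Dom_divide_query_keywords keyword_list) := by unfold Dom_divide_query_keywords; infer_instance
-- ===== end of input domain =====

-- B replaces A's setdefault-dict grouping (plus a second formatting pass over the dict values)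
-- with a nested-loop peeler that extracts each maximal same-window block by an inner index scan
-- and formats it directly from a slice; same cost, different decomposition (objective: alternative).


-- ===== PORT A =====
-- A-side helper: the body of A's accumulation loop (one iteration of the for-loop)
def dqkStepA (st : Int × PySem.Dict Int (List String)) (my_keyword : String) :
    Int × PySem.Dict Int (List String) :=
  let num_of_words := st.1 + ((PySem.Str.split₀ my_keyword).length : Int)
  let num_index := PySem.Int.floordiv num_of_words 26 + 1
  -- keyword_list_dict.setdefault(num_index, []).append(my_keyword) == d[num_index] = d.get(num_index, []) + [my_keyword]
  (num_of_words, st.2.modify num_index [] (· ++ [my_keyword]))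

def divide_query_keywords (keyword_list : List String) : Int × List String :=
  let res := keyword_list.foldl dqkStepA (0, PySem.Dict.empty)
  let list_query_keywords := res.2.values
  let query_keywords := list_query_keywords.foldl
    (fun acc each_query => acc ++ ["\"" ++ PySem.Str.join "\" | \"" each_query ++ "\""]) []
  (res.1, query_keywords)

-- ===== PORT B =====
-- B-side helper: the inner while loop of Source B — advance j while keyword_list[j] stays in the
-- current 26-word window; returns the final (total, j).  The Nat fuel only makes the loop
-- structurally total; callers always pass enough for the loop to run to its Python exit, and
-- keyword_list[j] is always in range here (0 ≤ j < n = length), so pyGetD's default is unused.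
def dqkInner (kws : List String) (n gidx : Int) : Nat → Int → Int → Int × Int
  | 0, total, j => (total, j)
  | fuel + 1, total, j =>
    if j < n then
      let t2 := total + ((PySem.Str.split₀ (PySem.List.pyGetD kws j "")).length : Int)
      if PySem.Int.floordiv t2 26 + 1 ≠ gidx then (total, j)
      else dqkInner kws n gidx fuel t2 (j + 1)
    else (total, j)

-- B-side helper: the outer while loop of Source B — peel one maximal block starting at i,
-- format keyword_list[i:j] and continue at j (same fuel discipline)
def dqkOuter (kws : List String) (n : Int) : Nat → Int → Int → List String → Int × List String
  | 0, total, _i, queries => (total, queries)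
  | fuel + 1, total, i, queries =>
    if i < n then
      let t := total + ((PySem.Str.split₀ (PySem.List.pyGetD kws i "")).length : Int)
      let gidx := PySem.Int.floordiv t 26 + 1
      let r := dqkInner kws n gidx fuel t (i + 1)
      dqkOuter kws n fuel r.1 r.2
        (queries ++ ["\"" ++ PySem.Str.join "\" | \""
            (PySem.List.slice kws (some i) (some r.2)) ++ "\""])
    else (total, queries)

def divide_query_keywords_alt (keyword_list : List String) : Int × List String :=
  dqkOuter keyword_list (keyword_list.length : Int) keyword_list.length 0 0 []

-- ===== PRECONDITION & SPEC =====
def Spec_divide_query_keywords (keyword_list : List String) (out : Int × List String) : Prop := out = divide_query_keywords_alt keyword_list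
instance (keyword_list : List String) (out : Int × List String) : Decidable (Spec_divide_query_keywords keyword_list out) := by unfold Spec_divide_query_keywords; infer_instance

-- ===== CLAIM (what is proved, stated in full; the proofs are below) =====
def Claim_equal_divide_query_keywords : Prop := ∀ (keyword_list : List String), Dom_divide_query_keywords keyword_list → Spec_divide_query_keywords keyword_list (divide_query_keywords keyword_list)

-- ===== LEMMAS AND PROOFS =====

-- proof-only canonical run builder: one element at a time, flushing the current run when the
-- group index changes; state = (total, cur_idx, cur, groups)
def dqkStepR (st : Int × Option Int × List String × List (List String)) (kw : String) :
    Int × Option Int × List String × List (List String) :=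
  let total := st.1 + ((PySem.Str.split₀ kw).length : Int)
  let idx := PySem.Int.floordiv total 26 + 1
  if some idx == st.2.1 then (total, st.2.1, st.2.2.1 ++ [kw], st.2.2.2)
  else (total, some idx, [kw], if st.2.2.1.isEmpty then st.2.2.2 else st.2.2.2 ++ [st.2.2.1])

def dqkFmt (g : List String) : String := "\"" ++ PySem.Str.join "\" | \"" g ++ "\""

-- modify at a key absent from the items appends a fresh entry
theorem dqk_modify_fresh (items : List (Int × List String)) (idx : Int) (kw : String)
    (h : ∀ p ∈ items, p.1 ≠ idx) :
    (PySem.Dict.mk items).modify idx [] (· ++ [kw]) = PySem.Dict.mk (items ++ [(idx, [kw])]) := by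
  have hc : (PySem.Dict.mk items).contains idx = false := by
    simp [PySem.Dict.contains]
    intro a b hab
    exact h (a, b) hab
  have hf : items.find? (fun p => p.1 == idx) = none := by
    apply List.find?_eq_none.mpr
    intro p hp
    simp [h p hp]
  simp [PySem.Dict.modify, PySem.Dict.insert, PySem.Dict.getD, PySem.Dict.get?, hc, hf]

-- modify at the key of the LAST entry (all earlier keys different) rewrites that entry in place
theorem dqk_modify_last (ps : List (Int × List String)) (k : Int) (cur : List String) (kw : String)
    (h : ∀ p ∈ ps, p.1 ≠ k) :
    (PySem.Dict.mk (ps ++ [(k, cur)])).modify k [] (· ++ [kw])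
      = PySem.Dict.mk (ps ++ [(k, cur ++ [kw])]) := by
  have hc : (PySem.Dict.mk (ps ++ [(k, cur)])).contains k = true := by
    simp [PySem.Dict.contains]
  have hf : ps.find? (fun p => p.1 == k) = none := by
    apply List.find?_eq_none.mpr
    intro p hp
    simp [h p hp]
  simp [PySem.Dict.modify, PySem.Dict.insert, PySem.Dict.getD, PySem.Dict.get?, hc,
        List.find?_append, hf]
  exact (List.map_congr_left (fun p hp => by simp [h p hp])).trans (List.map_id _)

-- A's loop and the run builder run in lock-step: A's dict is ps ++ [(k, cur)] exactly when the
-- run builder's state is (k, cur, groups) with groups the values of ps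
theorem dqk_loop (l : List String) : ∀ (n k : Int) (ps : List (Int × List String))
    (cur : List String) (groups : List (List String)),
    (∀ p ∈ ps, p.1 < k) → k = PySem.Int.floordiv n 26 + 1 →
    ps.map (·.2) = groups → cur ≠ [] →
    (l.foldl dqkStepA (n, PySem.Dict.mk (ps ++ [(k, cur)]))).1
      = (l.foldl dqkStepR (n, some k, cur, groups)).1
    ∧ (l.foldl dqkStepA (n, PySem.Dict.mk (ps ++ [(k, cur)]))).2.values
      = (l.foldl dqkStepR (n, some k, cur, groups)).2.2.2
        ++ [(l.foldl dqkStepR (n, some k, cur, groups)).2.2.1]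
    ∧ (l.foldl dqkStepR (n, some k, cur, groups)).2.2.1 ≠ [] := by
  induction l with
  | nil =>
    intro n k ps cur groups hlt hk hmap hcur
    refine ⟨rfl, ?_, hcur⟩
    simp [PySem.Dict.values, ← hmap]
  | cons kw rest ih =>
    intro n k ps cur groups hlt hk hmap hcur
    have hlen : (0 : Int) ≤ ((PySem.Str.split₀ kw).length : Int) := by positivity
    set m := n + ((PySem.Str.split₀ kw).length : Int) with hm
    set idx := PySem.Int.floordiv m 26 + 1 with hidx
    have hidx' : m / 26 + 1 = idx := by
      rw [hidx, PySem.Int.floordiv_eq_ediv_of_pos (by norm_num : (0:Int) < 26)]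
    have hmono : k ≤ idx := by
      have h26 : (0:Int) < 26 := by norm_num
      rw [hk, hidx, PySem.Int.floordiv_eq_ediv_of_pos h26, PySem.Int.floordiv_eq_ediv_of_pos h26]
      have := Int.ediv_le_ediv h26 (show n ≤ m by omega)
      omega
    by_cases hcase : idx = k
    · -- same group: A appends to the last entry, the run builder extends cur
      have hA : dqkStepA (n, PySem.Dict.mk (ps ++ [(k, cur)])) kw
          = (m, PySem.Dict.mk (ps ++ [(k, cur ++ [kw])])) := by
        simp only [dqkStepA, ← hm, ← hidx, hcase]
        rw [dqk_modify_last ps k cur kw (fun p hp => ne_of_lt (hlt p hp))]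
      have hB : dqkStepR (n, some k, cur, groups) kw = (m, some k, cur ++ [kw], groups) := by
        simp [dqkStepR, ← hm, hidx', hcase]
      rw [List.foldl_cons, List.foldl_cons, hA, hB]
      exact ih m k ps (cur ++ [kw]) groups hlt (hcase.symm.trans hidx) hmap (by simp)
    · -- new group index: A appends a fresh entry, the run builder flushes cur and starts anew
      have hgt : k < idx := lt_of_le_of_ne hmono (fun e => hcase e.symm)
      have hfresh : ∀ p ∈ ps ++ [(k, cur)], p.1 ≠ idx := by
        intro p hp
        rcases List.mem_append.mp hp with h1 | h1
        · exact ne_of_lt (lt_trans (hlt p h1) hgt)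
        · rw [List.mem_singleton.mp h1]; exact ne_of_lt hgt
      have hA : dqkStepA (n, PySem.Dict.mk (ps ++ [(k, cur)])) kw
          = (m, PySem.Dict.mk ((ps ++ [(k, cur)]) ++ [(idx, [kw])])) := by
        simp only [dqkStepA, ← hm, ← hidx]
        rw [dqk_modify_fresh _ idx kw hfresh]
      have hB : dqkStepR (n, some k, cur, groups) kw
          = (m, some idx, [kw], groups ++ [cur]) := by
        simp [dqkStepR, ← hm, hidx', hcase, List.isEmpty_iff, hcur]
      rw [List.foldl_cons, List.foldl_cons, hA, hB]
      refine ih m idx (ps ++ [(k, cur)]) [kw] (groups ++ [cur])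
        ?_ hidx (by simp [hmap]) (by simp)
      intro p hp
      rcases List.mem_append.mp hp with h1 | h1
      · exact lt_trans (hlt p h1) hgt
      · rw [List.mem_singleton.mp h1]; exact hgt

-- A's formatting loop is a map
theorem dqk_fmt (xs : List (List String)) :
    xs.foldl (fun acc each_query => acc ++ ["\"" ++ PySem.Str.join "\" | \"" each_query ++ "\""]) []
      = xs.map dqkFmt :=
  (PySem.List.foldl_append_singleton_eq_map _ xs []).trans (List.nil_append _)

-- slice arithmetic: extend a slice by its next element
theorem dqk_slice_succ (kws : List String) (i j : Int) (h0 : 0 ≤ i) (hij : i ≤ j)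
    (hj : j.toNat < kws.length) :
    PySem.List.slice kws (some i) (some (j + 1))
      = PySem.List.slice kws (some i) (some j) ++ [kws[j.toNat]] := by
  rw [PySem.List.slice_toNat _ h0 (by omega), PySem.List.slice_toNat _ h0 (by omega)]
  have h1 : (j + 1).toNat - i.toNat = (j.toNat - i.toNat) + 1 := by omega
  rw [h1, List.take_add_one]
  congr 1
  rw [List.getElem?_drop]
  have : i.toNat + (j.toNat - i.toNat) = j.toNat := by omega
  rw [this, List.getElem?_eq_getElem hj]
  rfl

-- a slice with positive extent is nonempty
theorem dqk_slice_ne_nil (kws : List String) (i j : Int) (h0 : 0 ≤ i) (hij : i < j)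
    (hjn : j ≤ (kws.length : Int)) :
    PySem.List.slice kws (some i) (some j) ≠ [] := by
  rw [PySem.List.slice_toNat _ h0 (by omega)]
  intro hnil
  have := congrArg List.length hnil
  simp at this
  omega

-- exhausted or exited loops return their state unchanged, for any fuel
theorem dqkInner_exit (kws : List String) (n gidx : Int) (fuel : Nat) (total j : Int)
    (h : ¬ j < n) : dqkInner kws n gidx fuel total j = (total, j) := by
  cases fuel with
  | zero => rfl
  | succ f => simp [dqkInner, h]

theorem dqkOuter_exit (kws : List String) (n : Int) (fuel : Nat) (total i : Int)
    (queries : List String) (h : ¬ i < n) :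
    dqkOuter kws n fuel total i queries = (total, queries) := by
  cases fuel with
  | zero => rfl
  | succ f => simp [dqkOuter, h]

-- the run builder over the tail from index j computes exactly what B's nested index loops do
theorem dqk_peel : ∀ (d : Nat) (kws : List String) (total j i : Int)
    (groups : List (List String)) (fuelI fuelO : Nat),
    d = ((kws.length : Int) - j).toNat →
    ((kws.length : Int) - j).toNat ≤ fuelI →
    ((kws.length : Int) - j).toNat ≤ fuelO →
    0 ≤ i → i < j → j ≤ (kws.length : Int) →
    dqkOuter kws (kws.length : Int) fuelO
        (dqkInner kws (kws.length : Int) (PySem.Int.floordiv total 26 + 1) fuelI total j).1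
        (dqkInner kws (kws.length : Int) (PySem.Int.floordiv total 26 + 1) fuelI total j).2
        (groups.map dqkFmt ++ [dqkFmt (PySem.List.slice kws (some i)
            (some (dqkInner kws (kws.length : Int) (PySem.Int.floordiv total 26 + 1) fuelI total j).2))])
      = (((kws.drop j.toNat).foldl dqkStepR
            (total, some (PySem.Int.floordiv total 26 + 1),
             PySem.List.slice kws (some i) (some j), groups)).1,
         (((kws.drop j.toNat).foldl dqkStepR
            (total, some (PySem.Int.floordiv total 26 + 1),
             PySem.List.slice kws (some i) (some j), groups)).2.2.2
           ++ [((kws.drop j.toNat).foldl dqkStepR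
            (total, some (PySem.Int.floordiv total 26 + 1),
             PySem.List.slice kws (some i) (some j), groups)).2.2.1]).map dqkFmt) := by
  intro d
  induction d with
  | zero =>
    intro kws total j i groups fuelI fuelO hd hfI hfO h0 hij hjn
    have hj : ¬ (j < (kws.length : Int)) := by omega
    have hdropnil : kws.drop j.toNat = [] := by
      apply List.drop_eq_nil_of_le
      omega
    rw [dqkInner_exit _ _ _ _ _ _ hj, hdropnil]
    simp [dqkOuter_exit _ _ _ _ _ _ hj]
  | succ d ih =>
    intro kws total j i groups fuelI fuelO hd hfI hfO h0 hij hjn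
    have hjlt : j < (kws.length : Int) := by omega
    have hjN : j.toNat < kws.length := by omega
    have hget : PySem.List.pyGetD kws j "" = kws[j.toNat] := by
      rw [PySem.List.pyGetD_eq_getElem] <;> omega
    have hdrop : kws.drop j.toNat = kws[j.toNat] :: kws.drop (j.toNat + 1) :=
      (List.getElem_cons_drop hjN).symm
    have hdrop1 : (j + 1).toNat = j.toNat + 1 := by omega
    obtain ⟨fI, rfl⟩ : ∃ fI, fuelI = fI + 1 := ⟨fuelI - 1, by omega⟩
    rw [show dqkInner kws (kws.length : Int) (PySem.Int.floordiv total 26 + 1) (fI + 1) total j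
          = if j < (kws.length : Int) then
              (let t2 := total + ((PySem.Str.split₀ (PySem.List.pyGetD kws j "")).length : Int);
               if PySem.Int.floordiv t2 26 + 1 ≠ PySem.Int.floordiv total 26 + 1 then (total, j)
               else dqkInner kws (kws.length : Int) (PySem.Int.floordiv total 26 + 1) fI t2 (j + 1))
            else (total, j) from rfl,
        if_pos hjlt]
    simp only [hget]
    by_cases hcase : PySem.Int.floordiv (total + ((PySem.Str.split₀ kws[j.toNat]).length : Int)) 26 + 1
        = PySem.Int.floordiv total 26 + 1
    · -- still in the same window: the inner scan advances, the run builder extends the run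
      rw [if_neg (by simp only [ne_eq, not_not]; exact hcase)]
      have hstep : dqkStepR (total, some (PySem.Int.floordiv total 26 + 1),
            PySem.List.slice kws (some i) (some j), groups) kws[j.toNat]
          = (total + ((PySem.Str.split₀ kws[j.toNat]).length : Int),
             some (PySem.Int.floordiv total 26 + 1),
             PySem.List.slice kws (some i) (some (j + 1)), groups) := by
        simp only [dqkStepR]
        rw [dqk_slice_succ kws i j h0 (by omega) hjN, hcase]
        simp
      rw [hdrop, List.foldl_cons, hstep, ← hdrop1]
      have H := ih kws (total + ((PySem.Str.split₀ kws[j.toNat]).length : Int)) (j + 1) i groups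
        fI fuelO (by omega) (by omega) (by omega) h0 (by omega) (by omega)
      rw [hcase] at H
      exact H
    · -- window boundary: the inner scan stops, the outer loop flushes the slice and restarts
      rw [if_pos hcase]
      obtain ⟨fO, rfl⟩ : ∃ fO, fuelO = fO + 1 := ⟨fuelO - 1, by omega⟩
      have hne := dqk_slice_ne_nil kws i j h0 hij hjn
      have hstep : dqkStepR (total, some (PySem.Int.floordiv total 26 + 1),
            PySem.List.slice kws (some i) (some j), groups) kws[j.toNat]
          = (total + ((PySem.Str.split₀ kws[j.toNat]).length : Int),
             some (PySem.Int.floordiv (total + ((PySem.Str.split₀ kws[j.toNat]).length : Int)) 26 + 1),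
             PySem.List.slice kws (some j) (some (j + 1)),
             groups ++ [PySem.List.slice kws (some i) (some j)]) := by
        have hsingle : PySem.List.slice kws (some j) (some (j + 1)) = [kws[j.toNat]] := by
          rw [dqk_slice_succ kws j j (by omega) le_rfl hjN,
              PySem.List.slice_toNat kws (by omega) (by omega)]
          simp
        simp only [dqkStepR, hsingle]
        rw [if_neg (by simp only [beq_iff_eq, Option.some.injEq]; exact hcase)]
        simp [List.isEmpty_iff, hne]
      rw [show dqkOuter kws (kws.length : Int) (fO + 1) total j
            (groups.map dqkFmt ++ [dqkFmt (PySem.List.slice kws (some i) (some j))])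
          = if j < (kws.length : Int) then
              (let t := total + ((PySem.Str.split₀ (PySem.List.pyGetD kws j "")).length : Int);
               let gidx := PySem.Int.floordiv t 26 + 1;
               let r := dqkInner kws (kws.length : Int) gidx fO t (j + 1);
               dqkOuter kws (kws.length : Int) fO r.1 r.2
                 ((groups.map dqkFmt ++ [dqkFmt (PySem.List.slice kws (some i) (some j))])
                   ++ ["\"" ++ PySem.Str.join "\" | \""
                       (PySem.List.slice kws (some j) (some r.2)) ++ "\""]))
            else (total, groups.map dqkFmt ++ [dqkFmt (PySem.List.slice kws (some i) (some j))])
          from rfl,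
        if_pos hjlt]
      simp only [hget]
      rw [hdrop, List.foldl_cons, hstep, ← hdrop1]
      have H := ih kws (total + ((PySem.Str.split₀ kws[j.toNat]).length : Int)) (j + 1) j
        (groups ++ [PySem.List.slice kws (some i) (some j)]) fO fO
        (by omega) (by omega) (by omega) (by omega) (by omega) (by omega)
      simpa [List.map_append, dqkFmt] using H

-- ===== VERDICT (by name: the statement is the Claim_ definition above) =====
theorem divide_query_keywords_spec : Claim_equal_divide_query_keywords := by
  intro keyword_list _
  unfold Spec_divide_query_keywords divide_query_keywords divide_query_keywords_alt
  cases keyword_list with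
  | nil => rfl
  | cons kw rest =>
    have hn : (0 : Int) < ((kw :: rest).length : Int) := by
      simp only [List.length_cons]
      push_cast
      omega
    rw [show dqkOuter (kw :: rest) ((kw :: rest).length : Int) (kw :: rest).length 0 0 []
        = dqkOuter (kw :: rest) ((kw :: rest).length : Int) (rest.length + 1) 0 0 [] from rfl]
    rw [show dqkOuter (kw :: rest) ((kw :: rest).length : Int) (rest.length + 1) 0 0 []
        = if (0 : Int) < ((kw :: rest).length : Int) then
            (let t := (0 : Int) + ((PySem.Str.split₀ (PySem.List.pyGetD (kw :: rest) 0 "")).length : Int);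
             let gidx := PySem.Int.floordiv t 26 + 1;
             let r := dqkInner (kw :: rest) ((kw :: rest).length : Int) gidx rest.length t (0 + 1);
             dqkOuter (kw :: rest) ((kw :: rest).length : Int) rest.length r.1 r.2
               ([] ++ ["\"" ++ PySem.Str.join "\" | \""
                   (PySem.List.slice (kw :: rest) (some 0) (some r.2)) ++ "\""]))
          else (0, []) from rfl,
      if_pos hn]
    simp only [PySem.List.pyGetD_zero_cons]
    set m := (0 : Int) + ((PySem.Str.split₀ kw).length : Int) with hm
    set idx := PySem.Int.floordiv m 26 + 1 with hidx
    have hpeel := dqk_peel ((((kw :: rest).length : Int)) - 1).toNat (kw :: rest) m 1 0 []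
      rest.length rest.length rfl
      (by simp only [List.length_cons]; push_cast; omega)
      (by simp only [List.length_cons]; push_cast; omega)
      (by omega) (by omega) (by simp only [List.length_cons]; push_cast; omega)
    have hslice01 : PySem.List.slice (kw :: rest) (some 0) (some 1) = [kw] := by
      rw [PySem.List.slice_toNat _ (by omega) (by omega)]
      simp
    rw [hslice01] at hpeel
    have hdrop1 : (kw :: rest).drop (1 : Int).toNat = rest := by simp
    rw [hdrop1] at hpeel
    simp only [List.map_nil, List.nil_append, ← hidx, dqkFmt] at hpeel
    simp only [zero_add, List.nil_append]
    rw [hpeel]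
    -- A's side
    have hA : dqkStepA (0, PySem.Dict.empty) kw = (m, PySem.Dict.mk ([] ++ [(idx, [kw])])) := by
      simp only [dqkStepA, ← hm, ← hidx]
      rw [show (PySem.Dict.empty : PySem.Dict Int (List String)) = PySem.Dict.mk [] from rfl,
          dqk_modify_fresh [] idx kw (by intro p hp; simp at hp)]
    rw [List.foldl_cons, hA]
    obtain ⟨h1, h2, h3⟩ := dqk_loop rest m idx [] [kw] []
      (by intro p hp; simp at hp) hidx rfl (by simp)
    rw [dqk_fmt]
    exact Prod.ext h1 (by rw [h2])
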